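-- pv_equiv track=rewrite | github.com/sp1d5r/ViraNovaBackend | serverless_backend/services/bounding_box_services.py | smooth_single_box
-- ===== SOURCE A (Python) =====
-- def smooth_single_box(bboxes, window_size=3):
--     smoothed_boxes = []
--     for i in range(len(bboxes)):
--         if bboxes[i] is None:
--             smoothed_boxes.append(None)
--             continue
--
--         x, y, w, h = 0, 0, 0, 0
--         count = 0
--         for j in range(max(0, i - window_size // 2), min(len(bboxes), i + window_size // 2 + 1)):
--             if bboxes[j] is not None:
--                 x += bboxes[j][0]
--                 y += bboxes[j][1]
--                 w += bboxes[j][2]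
--                 h += bboxes[j][3]
--                 count += 1
--         if count > 0:
--             smoothed_boxes.append((x // count, y // count, w // count, h // count))
--         else:
--             smoothed_boxes.append(None)
--     return smoothed_boxes
-- ===== SOURCE B (Python) =====
-- def smooth_single_box(bboxes, window_size=3):
--     # O(n) via one prefix-sum pass (coords + non-None count), O(1) per window query
--     n = len(bboxes)
--     half = window_size // 2
--     prefix = [(0, 0, 0, 0, 0)]
--     x = y = w = h = c = 0
--     for b in bboxes:
--         if b is not None:
--             x += b[0]; y += b[1]; w += b[2]; h += b[3]; c += 1
--         prefix.append((x, y, w, h, c))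
--
--     def avg_at(i, b):
--         if b is None:
--             return None
--         lo = max(0, i - half)
--         hi = min(n, i + half + 1)
--         if lo >= hi:
--             return None
--         x0, y0, w0, h0, c0 = prefix[lo]
--         x1, y1, w1, h1, c1 = prefix[hi]
--         cnt = c1 - c0
--         if cnt == 0:
--             return None
--         return ((x1 - x0) // cnt, (y1 - y0) // cnt, (w1 - w0) // cnt, (h1 - h0) // cnt)
--
--     return [avg_at(i, b) for i, b in enumerate(bboxes)]
-- ===== Notes on version B (the rewrite author's own statement) =====
-- stated objective: faster
-- what changed: Replaced A's per-index inner scan of the window with a single prefix-sum pass over coords and non-None counts, answering each window query in O(1) from two prefix-table lookups.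
-- outside the precondition, e.g. on smooth_single_box([(1, 2, 3)], -1): A returns [None], B raises IndexError
import Mathlib
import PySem

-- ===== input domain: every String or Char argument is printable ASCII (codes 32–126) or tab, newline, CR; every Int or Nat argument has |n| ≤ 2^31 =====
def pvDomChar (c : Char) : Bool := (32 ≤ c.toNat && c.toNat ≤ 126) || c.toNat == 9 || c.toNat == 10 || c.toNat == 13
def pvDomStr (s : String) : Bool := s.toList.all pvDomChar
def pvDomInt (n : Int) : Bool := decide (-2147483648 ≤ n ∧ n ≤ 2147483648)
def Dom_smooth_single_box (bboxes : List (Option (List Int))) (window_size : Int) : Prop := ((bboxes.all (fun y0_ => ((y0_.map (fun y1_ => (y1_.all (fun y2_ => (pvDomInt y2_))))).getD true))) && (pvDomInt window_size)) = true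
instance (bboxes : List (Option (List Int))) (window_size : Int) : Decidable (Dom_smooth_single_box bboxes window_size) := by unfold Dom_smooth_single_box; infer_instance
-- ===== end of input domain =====

-- B replaces A's per-index O(window) inner scan by one prefix-sum pass (coords + non-None count) with O(1) window queries: O(n·w) → O(n).

-- ===== PORT A =====
-- inner loop body of A: 'if bboxes[j] is not None: x += bboxes[j][0]; …; count += 1'
-- (bboxes[j][k] is PySem.List.pyGetD …; the default 0 is unreachable under Pre_, where every non-None box has ≥ 4 entries)
def ssbStepA (bboxes : List (Option (List Int))) (st : Int × Int × Int × Int × Int) (j : Int) :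
    Int × Int × Int × Int × Int :=
  match PySem.List.pyGetD bboxes j none with
  | none => st
  | some b =>
      (st.1 + PySem.List.pyGetD b 0 0, st.2.1 + PySem.List.pyGetD b 1 0,
       st.2.2.1 + PySem.List.pyGetD b 2 0, st.2.2.2.1 + PySem.List.pyGetD b 3 0,
       st.2.2.2.2 + 1)

def smooth_single_box (bboxes : List (Option (List Int))) (window_size : Int) : List (Option (List Int)) :=
  (PySem.List.pyRange 0 (bboxes.length : Int) 1).foldl (fun smoothed_boxes i =>
    match PySem.List.pyGetD bboxes i none with
    | none => smoothed_boxes ++ [none]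
    | some _ =>
        let st := (PySem.List.pyRange (max 0 (i - PySem.Int.floordiv window_size 2))
                     (min (bboxes.length : Int) (i + PySem.Int.floordiv window_size 2 + 1)) 1).foldl
                     (ssbStepA bboxes) (0, 0, 0, 0, 0)
        if st.2.2.2.2 > 0 then
          smoothed_boxes ++ [some [PySem.Int.floordiv st.1 st.2.2.2.2, PySem.Int.floordiv st.2.1 st.2.2.2.2,
                                   PySem.Int.floordiv st.2.2.1 st.2.2.2.2, PySem.Int.floordiv st.2.2.2.1 st.2.2.2.2]]
        else smoothed_boxes ++ [none]) []

-- ===== PORT B =====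
-- one step of B's prefix pass: add the box's coords (and 1 to the non-None count) to the running totals
def ssbStepB (st : Int × Int × Int × Int × Int) (b : Option (List Int)) :
    Int × Int × Int × Int × Int :=
  match b with
  | none => st
  | some l =>
      (st.1 + PySem.List.pyGetD l 0 0, st.2.1 + PySem.List.pyGetD l 1 0,
       st.2.2.1 + PySem.List.pyGetD l 2 0, st.2.2.2.1 + PySem.List.pyGetD l 3 0,
       st.2.2.2.2 + 1)

-- B's prefix loop ('for b in bboxes: … prefix.append((x,y,w,h,c))'): the list of successive running totals
def ssbPrefAux : List (Option (List Int)) → (Int × Int × Int × Int × Int) → List (Int × Int × Int × Int × Int)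
  | [], _ => []
  | b :: rest, st => ssbStepB st b :: ssbPrefAux rest (ssbStepB st b)

-- B's avg_at(i, b): O(1) window query from the prefix table
def ssbAvgAt (n half : Int) (pfx : List (Int × Int × Int × Int × Int)) (i : Int) (b : Option (List Int)) :
    Option (List Int) :=
  match b with
  | none => none
  | some _ =>
      let lo := max 0 (i - half)
      let hi := min n (i + half + 1)
      if lo ≥ hi then none
      else
        let p0 := PySem.List.pyGetD pfx lo (0, 0, 0, 0, 0)
        let p1 := PySem.List.pyGetD pfx hi (0, 0, 0, 0, 0)
        let cnt := p1.2.2.2.2 - p0.2.2.2.2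
        if cnt = 0 then none
        else some [PySem.Int.floordiv (p1.1 - p0.1) cnt, PySem.Int.floordiv (p1.2.1 - p0.2.1) cnt,
                   PySem.Int.floordiv (p1.2.2.1 - p0.2.2.1) cnt, PySem.Int.floordiv (p1.2.2.2.1 - p0.2.2.2.1) cnt]

def smooth_single_box_alt (bboxes : List (Option (List Int))) (window_size : Int) : List (Option (List Int)) :=
  let n : Int := bboxes.length
  let half := PySem.Int.floordiv window_size 2
  let pfx := (0, 0, 0, 0, 0) :: ssbPrefAux bboxes (0, 0, 0, 0, 0)
  bboxes.zipIdx.map (fun p => ssbAvgAt n half pfx (p.2 : Int) p.1)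

-- ===== PRECONDITION & SPEC =====
-- Pre_ excludes inputs holding a non-None box with fewer than 4 coordinates: on those A raises IndexError
-- whenever such a box falls into a scanned window, and returns only when no window ever reaches it
-- (e.g. a negative window_size), where B's prefix pass still reads all four coordinates and raises.
def Pre_smooth_single_box (bboxes : List (Option (List Int))) (window_size : Int) : Prop :=
  (bboxes.all (fun b => match b with | none => true | some l => decide (4 ≤ l.length))) = true
instance (bboxes : List (Option (List Int))) (window_size : Int) : Decidable (Pre_smooth_single_box bboxes window_size) := by unfold Pre_smooth_single_box; infer_instance

def pvWitness_smooth_single_box : List (Option (List Int)) × Int := ([some [1, 2, 3, 4], none, some [5, 6, 7, 8]], 3)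

def Spec_smooth_single_box (bboxes : List (Option (List Int))) (window_size : Int) (out : List (Option (List Int))) : Prop := out = smooth_single_box_alt bboxes window_size
instance (bboxes : List (Option (List Int))) (window_size : Int) (out : List (Option (List Int))) : Decidable (Spec_smooth_single_box bboxes window_size out) := by unfold Spec_smooth_single_box; infer_instance

-- ===== CLAIM (what is proved, stated in full; the proofs are below) =====
def Claim_equal_smooth_single_box : Prop := ∀ (bboxes : List (Option (List Int))) (window_size : Int), Dom_smooth_single_box bboxes window_size → Pre_smooth_single_box bboxes window_size → Spec_smooth_single_box bboxes window_size (smooth_single_box bboxes window_size)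

-- ===== LEMMAS AND PROOFS =====

-- contribution of one list entry to the running totals
def ssbG (b : Option (List Int)) : Int × Int × Int × Int × Int :=
  match b with
  | none => (0, 0, 0, 0, 0)
  | some l => (PySem.List.pyGetD l 0 0, PySem.List.pyGetD l 1 0, PySem.List.pyGetD l 2 0, PySem.List.pyGetD l 3 0, 1)

-- total contribution of a list
def ssbSum (l : List (Option (List Int))) : Int × Int × Int × Int × Int := (l.map ssbG).sum

lemma ssbStepB_eq (st : Int × Int × Int × Int × Int) (b : Option (List Int)) :
    ssbStepB st b = st + ssbG b := by
  cases b <;> simp [ssbStepB, ssbG, Prod.ext_iff]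

lemma ssbStepA_eq (bboxes : List (Option (List Int))) (st : Int × Int × Int × Int × Int) (j : Int) :
    ssbStepA bboxes st j = st + ssbG (PySem.List.pyGetD bboxes j none) := by
  cases h : PySem.List.pyGetD bboxes j none <;> simp [ssbStepA, ssbG, h, Prod.ext_iff]

lemma ssbSum_nil : ssbSum [] = 0 := rfl

lemma ssbSum_append (l1 l2 : List (Option (List Int))) :
    ssbSum (l1 ++ l2) = ssbSum l1 + ssbSum l2 := by
  simp [ssbSum]

lemma ssbSum_cons (b : Option (List Int)) (l : List (Option (List Int))) :
    ssbSum (b :: l) = ssbG b + ssbSum l := by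
  simp [ssbSum]

lemma ssbG_cnt_nonneg (b : Option (List Int)) : 0 ≤ (ssbG b).2.2.2.2 := by
  cases b <;> simp [ssbG]

lemma ssbSum_cnt_nonneg (l : List (Option (List Int))) : 0 ≤ (ssbSum l).2.2.2.2 := by
  induction l with
  | nil => simp [ssbSum]
  | cons b rest ih =>
      rw [ssbSum_cons]
      have := ssbG_cnt_nonneg b
      simp only [Prod.snd_add]
      omega

lemma ssbSum_take_succ (l : List (Option (List Int))) (k : Nat) (hk : k < l.length) :
    ssbSum (l.take (k + 1)) = ssbSum (l.take k) + ssbG l[k] := by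
  rw [List.take_add_one, ssbSum_append]
  simp [List.getElem?_eq_getElem hk, ssbSum_cons, ssbSum_nil]

lemma ssbPrefAux_length (l : List (Option (List Int))) (st : Int × Int × Int × Int × Int) :
    (ssbPrefAux l st).length = l.length := by
  induction l generalizing st with
  | nil => rfl
  | cons b rest ih => simp [ssbPrefAux, ih]

lemma ssbPrefAux_getElem (l : List (Option (List Int))) (st : Int × Int × Int × Int × Int)
    (k : Nat) (hk : k < l.length) :
    (ssbPrefAux l st)[k]'(by rw [ssbPrefAux_length]; exact hk) = st + ssbSum (l.take (k + 1)) := by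
  induction l generalizing st k with
  | nil => simp at hk
  | cons b rest ih =>
      cases k with
      | zero =>
          simp [ssbPrefAux, ssbStepB_eq, ssbSum_cons, ssbSum_nil]
      | succ k =>
          have hk' : k < rest.length := by simpa using hk
          have h1 := ih (ssbStepB st b) k hk'
          simp only [ssbPrefAux, List.getElem_cons_succ]
          rw [h1, ssbStepB_eq, List.take_succ_cons, ssbSum_cons, add_assoc]

-- the full prefix table: entry k is the total of the first k boxes
lemma ssbPrefix_getElem (bboxes : List (Option (List Int))) (k : Nat) (hk : k ≤ bboxes.length) :
    ((0, 0, 0, 0, 0) :: ssbPrefAux bboxes (0, 0, 0, 0, 0))[k]'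
      (by simp [ssbPrefAux_length]; omega) = ssbSum (bboxes.take k) := by
  cases k with
  | zero => simp [ssbSum]
  | succ k =>
      have hk' : k < bboxes.length := by omega
      have := ssbPrefAux_getElem bboxes (0, 0, 0, 0, 0) k hk'
      simp only [List.getElem_cons_succ, this]
      have h0 : ((0, 0, 0, 0, 0) : Int × Int × Int × Int × Int) = 0 := rfl
      rw [h0, zero_add]

-- A's inner loop over range(lo, hi) computes the difference of two prefix totals
lemma ssbInner_aux (bboxes : List (Option (List Int))) (hi : Int)
    (hhi : hi ≤ (bboxes.length : Int)) :
    ∀ (d : Nat) (lo : Int) (st : Int × Int × Int × Int × Int), 0 ≤ lo → lo ≤ hi → (hi - lo).toNat = d →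
      (PySem.List.pyRange lo hi 1).foldl (ssbStepA bboxes) st
        = st + (ssbSum (bboxes.take hi.toNat) - ssbSum (bboxes.take lo.toNat)) := by
  intro d
  induction d with
  | zero =>
      intro lo st h1 h2 h3
      have : hi = lo := by omega
      subst this
      rw [PySem.List.pyRange_one_eq_nil le_rfl]
      simp
  | succ d ih =>
      intro lo st h1 h2 h3
      have hlt : lo < hi := by omega
      rw [PySem.List.pyRange_one_cons hlt]
      simp only [List.foldl_cons]
      rw [ih (lo + 1) (ssbStepA bboxes st lo) (by omega) (by omega) (by omega)]
      rw [ssbStepA_eq]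
      have hidx : lo.toNat < bboxes.length := by omega
      have hget : PySem.List.pyGetD bboxes lo none = bboxes[lo.toNat] := by
        rw [PySem.List.pyGetD_eq_getElem bboxes (i := lo) none h1 (by omega)]
      have hsucc : (lo + 1).toNat = lo.toNat + 1 := by omega
      rw [hget, hsucc, ssbSum_take_succ bboxes lo.toNat hidx]
      abel

lemma ssbInner_eq (bboxes : List (Option (List Int))) (lo hi : Int)
    (hlo : 0 ≤ lo) (hlohi : lo ≤ hi) (hhi : hi ≤ (bboxes.length : Int))
    (st : Int × Int × Int × Int × Int) :
    (PySem.List.pyRange lo hi 1).foldl (ssbStepA bboxes) st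
      = st + (ssbSum (bboxes.take hi.toNat) - ssbSum (bboxes.take lo.toNat)) :=
  ssbInner_aux bboxes hi hhi (hi - lo).toNat lo st hlo hlohi rfl

-- count components are monotone along prefixes
lemma ssbSum_take_cnt_mono (l : List (Option (List Int))) (a b : Nat) (hab : a ≤ b) :
    (ssbSum (l.take a)).2.2.2.2 ≤ (ssbSum (l.take b)).2.2.2.2 := by
  have : l.take b = l.take a ++ (l.drop a).take (b - a) := by
    rw [← List.take_add]
    congr 1
    omega
  rw [this, ssbSum_append]
  have := ssbSum_cnt_nonneg ((l.drop a).take (b - a))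
  simp only [Prod.snd_add]
  omega

-- the element A appends at index i
def ssbEltA (bboxes : List (Option (List Int))) (window_size : Int) (i : Int) : Option (List Int) :=
  match PySem.List.pyGetD bboxes i none with
  | none => none
  | some _ =>
      let st := (PySem.List.pyRange (max 0 (i - PySem.Int.floordiv window_size 2))
                   (min (bboxes.length : Int) (i + PySem.Int.floordiv window_size 2 + 1)) 1).foldl
                   (ssbStepA bboxes) (0, 0, 0, 0, 0)
      if st.2.2.2.2 > 0 then
        some [PySem.Int.floordiv st.1 st.2.2.2.2, PySem.Int.floordiv st.2.1 st.2.2.2.2,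
              PySem.Int.floordiv st.2.2.1 st.2.2.2.2, PySem.Int.floordiv st.2.2.2.1 st.2.2.2.2]
      else none

lemma smooth_single_box_eq_map (bboxes : List (Option (List Int))) (window_size : Int) :
    smooth_single_box bboxes window_size
      = (PySem.List.pyRange 0 (bboxes.length : Int) 1).map (ssbEltA bboxes window_size) := by
  unfold smooth_single_box
  have hbody : (fun (smoothed_boxes : List (Option (List Int))) (i : Int) =>
      match PySem.List.pyGetD bboxes i none with
      | none => smoothed_boxes ++ [none]
      | some _ =>
          let st := (PySem.List.pyRange (max 0 (i - PySem.Int.floordiv window_size 2))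
                       (min (bboxes.length : Int) (i + PySem.Int.floordiv window_size 2 + 1)) 1).foldl
                       (ssbStepA bboxes) (0, 0, 0, 0, 0)
          if st.2.2.2.2 > 0 then
            smoothed_boxes ++ [some [PySem.Int.floordiv st.1 st.2.2.2.2, PySem.Int.floordiv st.2.1 st.2.2.2.2,
                                     PySem.Int.floordiv st.2.2.1 st.2.2.2.2, PySem.Int.floordiv st.2.2.2.1 st.2.2.2.2]]
          else smoothed_boxes ++ [none])
      = (fun smoothed_boxes i => smoothed_boxes ++ [ssbEltA bboxes window_size i]) := by
    funext acc i
    cases h : PySem.List.pyGetD bboxes i none <;> simp only [ssbEltA, h] <;> split_ifs <;> rfl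
  rw [hbody, PySem.List.foldl_append_singleton_eq_map]
  simp

-- per-index agreement of the two programs
lemma ssbElt_agree (bboxes : List (Option (List Int))) (window_size : Int) (i : Nat)
    (hi : i < bboxes.length) :
    ssbEltA bboxes window_size (i : Int)
      = ssbAvgAt (bboxes.length : Int) (PySem.Int.floordiv window_size 2)
          ((0, 0, 0, 0, 0) :: ssbPrefAux bboxes (0, 0, 0, 0, 0)) (i : Int) bboxes[i] := by
  have hget : PySem.List.pyGetD bboxes (i : Int) none = bboxes[i] := by
    rw [PySem.List.pyGetD_eq_getElem bboxes (i := (i : Int)) none (by omega) (by exact_mod_cast hi)]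
    simp
  set half := PySem.Int.floordiv window_size 2 with hhalf
  set n : Int := (bboxes.length : Int) with hn
  set lo := max 0 ((i : Int) - half) with hlo
  set hi' := min n ((i : Int) + half + 1) with hhi'
  have hlo0 : 0 ≤ lo := le_max_left _ _
  have hhin : hi' ≤ n := min_le_left _ _
  cases hb : bboxes[i] with
  | none =>
      simp [ssbEltA, ssbAvgAt, hget, hb]
  | some b =>
      by_cases hord : lo ≥ hi'
      · -- empty window on both sides
        have hnil : PySem.List.pyRange lo hi' 1 = [] := PySem.List.pyRange_one_eq_nil hord
        simp only [ssbEltA, ssbAvgAt, hget, hb, ← hlo, ← hhi', ← hhalf, ← hn, hnil]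
        simp [hord]
      · have hlt : lo < hi' := lt_of_not_ge hord
        have hfold := ssbInner_eq bboxes lo hi' hlo0 (le_of_lt hlt) hhin (0, 0, 0, 0, 0)
        have hlen : ((0, 0, 0, 0, 0) :: ssbPrefAux bboxes (0, 0, 0, 0, 0)).length = bboxes.length + 1 := by
          simp [ssbPrefAux_length]
        have hlop : lo.toNat ≤ bboxes.length := by omega
        have hhip : hi'.toNat ≤ bboxes.length := by omega
        have hp0 : PySem.List.pyGetD ((0, 0, 0, 0, 0) :: ssbPrefAux bboxes (0, 0, 0, 0, 0)) lo (0, 0, 0, 0, 0)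
            = ssbSum (bboxes.take lo.toNat) := by
          rw [PySem.List.pyGetD_eq_getElem _ (i := lo) _ hlo0 (by rw [hlen]; push_cast; omega)]
          exact ssbPrefix_getElem bboxes lo.toNat hlop
        have hp1 : PySem.List.pyGetD ((0, 0, 0, 0, 0) :: ssbPrefAux bboxes (0, 0, 0, 0, 0)) hi' (0, 0, 0, 0, 0)
            = ssbSum (bboxes.take hi'.toNat) := by
          rw [PySem.List.pyGetD_eq_getElem _ (i := hi') _ (by omega) (by rw [hlen]; push_cast; omega)]
          exact ssbPrefix_getElem bboxes hi'.toNat hhip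
        have hcntmono := ssbSum_take_cnt_mono bboxes lo.toNat hi'.toNat (by omega)
        simp only [ssbEltA, ssbAvgAt, hget, hb, ← hlo, ← hhi', ← hhalf, ← hn, hfold, hp0, hp1]
        rw [if_neg (by omega : ¬ lo ≥ hi')]
        set S0 := ssbSum (bboxes.take lo.toNat)
        set S1 := ssbSum (bboxes.take hi'.toNat)
        have hzero : ((0, 0, 0, 0, 0) : Int × Int × Int × Int × Int) + (S1 - S0) = S1 - S0 := by
          have h0 : ((0, 0, 0, 0, 0) : Int × Int × Int × Int × Int) = 0 := rfl
          rw [h0, zero_add]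
        rw [hzero]
        have hc1 : (S1 - S0).1 = S1.1 - S0.1 := rfl
        have hc2 : (S1 - S0).2.1 = S1.2.1 - S0.2.1 := rfl
        have hc3 : (S1 - S0).2.2.1 = S1.2.2.1 - S0.2.2.1 := rfl
        have hc4 : (S1 - S0).2.2.2.1 = S1.2.2.2.1 - S0.2.2.2.1 := rfl
        have hc5 : (S1 - S0).2.2.2.2 = S1.2.2.2.2 - S0.2.2.2.2 := rfl
        by_cases hpos : S1.2.2.2.2 - S0.2.2.2.2 > 0
        · rw [if_pos (by rw [hc5]; exact hpos), if_neg (by omega)]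
          rw [hc1, hc2, hc3, hc4, hc5]
        · rw [if_neg (by rw [hc5]; exact hpos), if_pos (by omega)]

-- ===== VERDICT (by name: the statement is the Claim_ definition above) =====
theorem smooth_single_box_spec : Claim_equal_smooth_single_box := by
  intro bboxes window_size _hDom _hPre
  unfold Spec_smooth_single_box
  rw [smooth_single_box_eq_map]
  unfold smooth_single_box_alt
  apply List.ext_getElem
  · simp [PySem.List.length_pyRange_one]
  · intro k hk1 hk2
    have hkn : k < bboxes.length := by
      simpa [PySem.List.length_pyRange_one] using hk1
    rw [List.getElem_map, List.getElem_map]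
    have hrange : ∀ (h : k < (PySem.List.pyRange 0 (bboxes.length : Int) 1).length),
        (PySem.List.pyRange 0 (bboxes.length : Int) 1)[k]'h = (k : Int) := by
      intro h
      rw [PySem.List.getElem_pyRange_one]
      ring
    rw [hrange, List.getElem_zipIdx]
    simpa using ssbElt_agree bboxes window_size k hkn
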